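-- pv_equiv track=rewrite | github.com/tnorlund/Portfolio | receipt_label/receipt_label/langgraph_integration/nodes/audit_trail.py | count_record_types
-- ===== SOURCE A (Python) =====
-- from typing import Dict, Any, List
-- from collections import defaultdict
--
-- def count_record_types(records: List[Dict[str, Any]]) -> Dict[str, int]:
--     """Count records by type for metrics."""
--     type_counts = defaultdict(int)
--
--     for record in records:
--         sk = record.get("sk", "")
--         if sk.startswith("WORKFLOW#"):
--             type_counts["workflow"] += 1
--         elif sk.startswith("NODE#"):
--             type_counts["node"] += 1
--         elif sk.startswith("PATTERN#"):
--             type_counts["pattern"] += 1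
--         elif sk.startswith("CALL#"):
--             type_counts["gpt"] += 1
--         elif sk.startswith("FAIL#"):
--             type_counts["validation"] += 1
--
--     return dict(type_counts)
-- ===== SOURCE B (Python) =====
-- from collections import Counter
--
-- _SK_LABELS = {
--     "WORKFLOW": "workflow",
--     "NODE": "node",
--     "PATTERN": "pattern",
--     "CALL": "gpt",
--     "FAIL": "validation",
-- }
--
--
-- def _classify(sk):
--     """Split sk at its first '#' and look the head up in the label map."""
--     head, sep, _tail = sk.partition("#")
--     return _SK_LABELS.get(head) if sep else None
--
--
-- def count_record_types(records):
--     """Count records by type for metrics: classify first, then count with Counter."""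
--     labels = []
--     for record in records:
--         label = _classify(record.get("sk", ""))
--         if label is not None:
--             labels.append(label)
--     return dict(Counter(labels))
-- ===== Notes on version B (the rewrite author's own statement) =====
-- stated objective: idiomatic
-- what changed: B is two-staged: it first classifies each record by splitting sk at its first '#' (str.partition) and looking the head up in a hash map (instead of A's ordered if/elif prefix tests), collecting a list of labels, and then counts that list with collections.Counter instead of incrementing a dict inside the loop.
import Mathlib
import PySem

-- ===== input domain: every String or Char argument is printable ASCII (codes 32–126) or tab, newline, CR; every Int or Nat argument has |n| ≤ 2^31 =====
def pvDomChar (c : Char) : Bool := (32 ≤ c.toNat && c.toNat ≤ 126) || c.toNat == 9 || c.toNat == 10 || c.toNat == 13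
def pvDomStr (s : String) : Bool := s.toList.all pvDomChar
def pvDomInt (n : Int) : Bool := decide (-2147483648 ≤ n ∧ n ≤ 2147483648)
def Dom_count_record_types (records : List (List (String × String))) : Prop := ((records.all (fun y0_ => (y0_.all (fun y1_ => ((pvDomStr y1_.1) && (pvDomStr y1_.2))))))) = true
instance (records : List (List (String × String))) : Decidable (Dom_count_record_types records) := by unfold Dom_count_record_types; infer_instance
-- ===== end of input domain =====

-- B classifies by splitting sk at its first '#' plus a hash-map lookup and counts the
-- collected label list with Counter in a second stage, instead of A's single pass of
-- ordered prefix tests incrementing a dict (idiomatic; same cost).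

-- ===== PORT A =====
def count_record_types (records : List (List (String × String))) : List (String × Int) :=
  (records.foldl (fun type_counts record =>
    let sk := (PySem.Dict.mk record).getD "sk" ""
    if PySem.Str.startswith sk "WORKFLOW#" then type_counts.modify "workflow" 0 (· + 1)
    else if PySem.Str.startswith sk "NODE#" then type_counts.modify "node" 0 (· + 1)
    else if PySem.Str.startswith sk "PATTERN#" then type_counts.modify "pattern" 0 (· + 1)
    else if PySem.Str.startswith sk "CALL#" then type_counts.modify "gpt" 0 (· + 1)
    else if PySem.Str.startswith sk "FAIL#" then type_counts.modify "validation" 0 (· + 1)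
    else type_counts) (PySem.Dict.empty : PySem.Dict String Int)).items

-- ===== PORT B =====
-- _SK_LABELS, keyed by the string content (List Char = the string's code points)
def pvSkLabels : PySem.Dict (List Char) String :=
  PySem.Dict.mk
    [("WORKFLOW".toList, "workflow"), ("NODE".toList, "node"),
     ("PATTERN".toList, "pattern"), ("CALL".toList, "gpt"), ("FAIL".toList, "validation")]

-- hand port of the (head, separator-found) part of sk.partition("#") Source B uses;
-- exact for the one-character separator '#'
def pvPartitionHash : List Char → List Char × Bool
  | [] => ([], false)
  | c :: t => if c = '#' then ([], true) else
      let r := pvPartitionHash t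
      (c :: r.1, r.2)

-- port of _classify
def pvClassify (sk : String) : Option String :=
  let p := pvPartitionHash sk.toList
  if p.2 then pvSkLabels.get? p.1 else none

def count_record_types_alt (records : List (List (String × String))) : List (String × Int) :=
  let labels := records.foldl (fun labels record =>
    match pvClassify ((PySem.Dict.mk record).getD "sk" "") with
    | some label => labels ++ [label]
    | none => labels) []
  (PySem.Dict.counter labels).items

-- ===== PRECONDITION & SPEC =====
def Spec_count_record_types (records : List (List (String × String))) (out : List (String × Int)) : Prop := out = count_record_types_alt records
instance (records : List (List (String × String))) (out : List (String × Int)) : Decidable (Spec_count_record_types records out) := by unfold Spec_count_record_types; infer_instance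

-- ===== CLAIM (what is proved, stated in full; the proofs are below) =====
def Claim_equal_count_record_types : Prop := ∀ (records : List (List (String × String))), Dom_count_record_types records → Spec_count_record_types records (count_record_types records)

-- ===== LEMMAS AND PROOFS =====

-- partition finds head P before a '#' exactly when P ++ "#" is a prefix
theorem pvPartition_prefix (P : List Char) (hP : '#' ∉ P) :
    ∀ l : List Char, pvPartitionHash l = (P, true) ↔ (P ++ ['#']) <+: l := by
  induction P with
  | nil =>
    intro l
    cases l with
    | nil => simp [pvPartitionHash]
    | cons c t =>
      by_cases hc : c = '#'
      · simp [pvPartitionHash, hc]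
      · simp only [pvPartitionHash, if_neg hc, List.nil_append, List.cons_prefix_cons,
                   Prod.ext_iff]
        constructor
        · rintro ⟨h1, -⟩; simp at h1
        · rintro ⟨h1, -⟩; exact absurd h1.symm hc
  | cons p P' ih =>
    intro l
    have hp : p ≠ '#' := fun h => hP (h ▸ List.mem_cons_self)
    have hP' : '#' ∉ P' := fun h => hP (List.mem_cons_of_mem _ h)
    cases l with
    | nil => simp [pvPartitionHash]
    | cons c t =>
      by_cases hc : c = '#'
      · subst hc
        constructor
        · intro h
          simp [pvPartitionHash] at h
        · intro h
          rw [List.cons_append, List.cons_prefix_cons] at h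
          exact absurd h.1 hp
      · simp only [pvPartitionHash, if_neg hc, Prod.ext_iff, List.cons_append,
                   List.cons_prefix_cons, List.cons.injEq]
        constructor
        · rintro ⟨⟨rfl, hX⟩, h2⟩
          exact ⟨rfl, (ih hP' t).mp (Prod.ext hX h2)⟩
        · rintro ⟨rfl, h2⟩
          have h3 := (ih hP' t).mpr h2
          exact ⟨⟨rfl, by simp [h3]⟩, by simp [h3]⟩

-- B's classify equals A's if/elif prefix cascade
theorem pvClassify_eq (sk : String) :
    pvClassify sk =
      (if PySem.Str.startswith sk "WORKFLOW#" then some "workflow"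
       else if PySem.Str.startswith sk "NODE#" then some "node"
       else if PySem.Str.startswith sk "PATTERN#" then some "pattern"
       else if PySem.Str.startswith sk "CALL#" then some "gpt"
       else if PySem.Str.startswith sk "FAIL#" then some "validation"
       else none) := by
  have conv : ∀ (p : String) (P : List Char), p.toList = P ++ ['#'] → '#' ∉ P →
      (PySem.Str.startswith sk p = true ↔ pvPartitionHash sk.toList = (P, true)) := by
    intro p P hp hP
    rw [show PySem.Str.startswith sk p = PySem.Chars.startswith sk.toList p.toList from by simp,
        PySem.Chars.startswith_iff, hp]
    exact (pvPartition_prefix P hP sk.toList).symm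
  have cW := conv "WORKFLOW#" "WORKFLOW".toList (by decide) (by decide)
  have cN := conv "NODE#" "NODE".toList (by decide) (by decide)
  have cP := conv "PATTERN#" "PATTERN".toList (by decide) (by decide)
  have cC := conv "CALL#" "CALL".toList (by decide) (by decide)
  have cF := conv "FAIL#" "FAIL".toList (by decide) (by decide)
  rcases hpp : pvPartitionHash sk.toList with ⟨hd, f⟩
  rw [hpp] at cW cN cP cC cF
  simp at cW cN cP cC cF
  cases f with
  | false =>
    simp [pvClassify, hpp, cW, cN, cP, cC, cF]
  | true =>
    by_cases e1 : hd = "WORKFLOW".toList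
    · subst e1
      simp [pvClassify, hpp, pvSkLabels, cW, cN, cP, cC, cF]
      decide
    by_cases e2 : hd = "NODE".toList
    · subst e2
      simp [pvClassify, hpp, pvSkLabels, cW, cN, cP, cC, cF]
      decide
    by_cases e3 : hd = "PATTERN".toList
    · subst e3
      simp [pvClassify, hpp, pvSkLabels, cW, cN, cP, cC, cF]
      decide
    by_cases e4 : hd = "CALL".toList
    · subst e4
      simp [pvClassify, hpp, pvSkLabels, cW, cN, cP, cC, cF]
      decide
    by_cases e5 : hd = "FAIL".toList
    · subst e5
      simp [pvClassify, hpp, pvSkLabels, cW, cN, cP, cC, cF]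
      decide
    simp at e1 e2 e3 e4 e5
    simp [pvClassify, hpp, pvSkLabels, PySem.Dict.get?_mk_cons, PySem.Dict.get?, List.find?, beq_iff_eq,
          cW, cN, cP, cC, cF, e1, e2, e3, e4, e5,
          Ne.symm e1, Ne.symm e2, Ne.symm e3, Ne.symm e4, Ne.symm e5,
          beq_eq_false_iff_ne.mpr (Ne.symm e1), beq_eq_false_iff_ne.mpr (Ne.symm e2),
          beq_eq_false_iff_ne.mpr (Ne.symm e3), beq_eq_false_iff_ne.mpr (Ne.symm e4),
          beq_eq_false_iff_ne.mpr (Ne.symm e5)]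

-- counting the collected label list equals counting inside the classification loop
theorem pv_fold_labels (records : List (List (String × String))) :
    ∀ (acc : List String) (d : PySem.Dict String Int),
      (records.foldl (fun labels record =>
         match pvClassify ((PySem.Dict.mk record).getD "sk" "") with
         | some label => labels ++ [label]
         | none => labels) acc).foldl (fun d x => d.modify x 0 (· + 1)) d
      = records.foldl (fun d record =>
          match pvClassify ((PySem.Dict.mk record).getD "sk" "") with
          | some lab => d.modify lab 0 (· + 1)
          | none => d) (acc.foldl (fun d x => d.modify x 0 (· + 1)) d) := by
  induction records with
  | nil => intro acc d; rfl
  | cons r t ih =>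
    intro acc d
    simp only [List.foldl_cons]
    cases h : pvClassify ((PySem.Dict.mk r).getD "sk" "") with
    | none => simpa [h] using ih acc d
    | some lab => simpa [h, List.foldl_append] using ih (acc ++ [lab]) d

-- ===== VERDICT (by name: the statement is the Claim_ definition above) =====
theorem count_record_types_spec : Claim_equal_count_record_types := by
  intro records _
  unfold Spec_count_record_types count_record_types count_record_types_alt
  have hstep : (fun (type_counts : PySem.Dict String Int) record =>
      let sk := (PySem.Dict.mk record).getD "sk" ""
      if PySem.Str.startswith sk "WORKFLOW#" then type_counts.modify "workflow" 0 (· + 1)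
      else if PySem.Str.startswith sk "NODE#" then type_counts.modify "node" 0 (· + 1)
      else if PySem.Str.startswith sk "PATTERN#" then type_counts.modify "pattern" 0 (· + 1)
      else if PySem.Str.startswith sk "CALL#" then type_counts.modify "gpt" 0 (· + 1)
      else if PySem.Str.startswith sk "FAIL#" then type_counts.modify "validation" 0 (· + 1)
      else type_counts)
      = (fun (d : PySem.Dict String Int) record =>
        match pvClassify ((PySem.Dict.mk record).getD "sk" "") with
        | some lab => d.modify lab 0 (· + 1)
        | none => d) := by
    funext d record
    dsimp only
    rw [pvClassify_eq]
    split_ifs <;> rfl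
  dsimp only
  rw [PySem.Dict.counter_eq_foldl, pv_fold_labels records [] PySem.Dict.empty, hstep]
  rfl
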